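-- pv_equiv track=rewrite | github.com/youth4ever/orion | Project EULER/pb183 Maximum product of parts.py | fraction_is_finite
-- ===== SOURCE A (Python) =====
-- import math
-- import math
-- import math, fractions
--
-- def d(n):
--     d = int((float(n)/math.e))
--     if n>(1+1./d)**d*(1+d):
--         d+=1
--     while d%2==0: d/=2
--     while d%5==0: d/=5
--     if n%d == 0:
--         return -n
--     else:
--         return n
--
-- def fraction_is_finite(a, b, base): # computing powers does not change "finiteness"
--     d = 2
--     while b > 1:
--         while b%d == 0:
--             if a%d == 0:
--                 a/=d
--             elif base%d:
--                 return False
--             b/=d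
--         d+=1
--     return True
-- ===== SOURCE B (Python) =====
-- import math
--
-- def fraction_is_finite(a, b, base):
--     if b <= 1:
--         return True
--     b //= math.gcd(a, b)
--     g = math.gcd(b, base)
--     while g > 1:
--         while b % g == 0:
--             b //= g
--         g = math.gcd(b, base)
--     return b == 1
-- ===== Notes on version B (the rewrite author's own statement) =====
-- stated objective: faster
-- what changed: A trial-divides b by every d = 2,3,4,... up to b's largest prime factor, cancelling against a and checking base one prime occurrence at a time; B cancels the whole common part with a single gcd (b //= gcd(a,b)) and then strips base-primes from the residue with a repeated gcd(b,base) loop; intended as asymptotically faster (the gain depends on b's largest prime factor: measured 50x median at the largest probe size, ~1x on smooth b, >10^5x on prime b near 2^31).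
import Mathlib
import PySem

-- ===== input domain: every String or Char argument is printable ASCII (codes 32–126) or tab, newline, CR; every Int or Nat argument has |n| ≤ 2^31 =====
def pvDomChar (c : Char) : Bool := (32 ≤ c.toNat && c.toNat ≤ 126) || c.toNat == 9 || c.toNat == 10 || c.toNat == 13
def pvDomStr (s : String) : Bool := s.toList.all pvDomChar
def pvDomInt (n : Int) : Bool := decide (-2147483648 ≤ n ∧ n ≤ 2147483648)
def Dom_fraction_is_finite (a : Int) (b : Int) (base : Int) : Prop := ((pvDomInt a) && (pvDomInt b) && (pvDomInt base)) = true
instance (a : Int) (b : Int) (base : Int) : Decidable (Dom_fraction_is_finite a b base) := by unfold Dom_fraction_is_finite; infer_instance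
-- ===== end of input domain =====

-- B replaces A's per-integer trial division (d = 2,3,4,… up to b's largest prime factor) by gcd
-- arithmetic: cancel a against b with one gcd, then strip base-primes with a repeated-gcd loop
-- (intended as faster; the measured gain depends on b's largest prime factor).

-- ===== PORT A =====
-- inner `while b%d == 0: ...` loop of A; `none` = Python's `return False`.
-- Python's a/=d, b/=d are float true divisions, but exact here (the divisor divides), ported as floordiv.
-- The fuel argument is only a totality guard; the proofs show the fuel supplied below is never exhausted.
def pvInnerA (base d : Int) : Nat → Int → Int → Option (Int × Int)
  | 0, a, b => some (a, b)
  | f + 1, a, b =>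
    if PySem.Int.mod b d = 0 then
      if PySem.Int.mod a d = 0 then
        pvInnerA base d f (PySem.Int.floordiv a d) (PySem.Int.floordiv b d)
      else if PySem.Int.mod base d ≠ 0 then none
      else pvInnerA base d f a (PySem.Int.floordiv b d)
    else some (a, b)

-- outer `while b > 1:` loop of A, advancing d by 1 each round.
def pvOuterA (base : Int) : Nat → Int → Int → Int → Bool
  | 0, _, _, _ => true
  | f + 1, a, b, d =>
    if b > 1 then
      match pvInnerA base d b.toNat a b with
      | none => false
      | some (a', b') => pvOuterA base f a' b' (d + 1)
    else true

def fraction_is_finite (a : Int) (b : Int) (base : Int) : Bool :=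
  pvOuterA base (b.toNat + 1) a b 2

-- ===== PORT B =====
-- `while b % g == 0: b //= g`  (b stays a positive integer throughout, so it is kept as a Nat)
def pvStripB (g : Nat) : Nat → Nat → Nat
  | 0, b => b
  | f + 1, b => if b % g = 0 then pvStripB g f (b / g) else b

-- `g = gcd(b, base); while g > 1: strip g from b; g = gcd(b, base)`; returns the final b.
def pvLoopB (c : Nat) : Nat → Nat → Nat
  | 0, b => b
  | f + 1, b =>
    if 1 < Nat.gcd b c then pvLoopB c f (pvStripB (Nat.gcd b c) b b) else b

def fraction_is_finite_alt (a : Int) (b : Int) (base : Int) : Bool :=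
  if b ≤ 1 then true
  else
    -- b //= math.gcd(a, b): exact division, b > 1 so Nat arithmetic is Python-exact
    pvLoopB base.natAbs (b.toNat / Nat.gcd a.natAbs b.toNat) (b.toNat / Nat.gcd a.natAbs b.toNat) == 1

-- ===== PRECONDITION & SPEC =====
def Spec_fraction_is_finite (a : Int) (b : Int) (base : Int) (out : Bool) : Prop := out = fraction_is_finite_alt a b base
instance (a : Int) (b : Int) (base : Int) (out : Bool) : Decidable (Spec_fraction_is_finite a b base out) := by unfold Spec_fraction_is_finite; infer_instance

-- ===== CLAIM (what is proved, stated in full; the proofs are below) =====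
def Claim_equal_fraction_is_finite : Prop := ∀ (a : Int) (b : Int) (base : Int), Dom_fraction_is_finite a b base → Spec_fraction_is_finite a b base (fraction_is_finite a b base)

-- ===== LEMMAS AND PROOFS =====

-- The common mathematical content: every prime power dividing b divides a, unless the prime divides base.
def pvGood (a b base : Int) : Prop :=
  ∀ (p k : Nat), p.Prime → ((p : Int)) ^ k ∣ b → (((p : Int)) ^ k ∣ a ∨ ((p : Int)) ∣ base)

lemma pvInnerA_spec (d base : Int) (hd : 2 ≤ d) :
    ∀ (f : Nat) (a b : Int), 1 ≤ b → b.toNat ≤ f →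
      ∃ (e : Nat) (b' : Int), b = d ^ e * b' ∧ ¬ d ∣ b' ∧ 1 ≤ b' ∧
        ((pvInnerA base d f a b = none ∧ ¬ d ∣ base ∧ ¬ d ^ e ∣ a) ∨
          ∃ (i : Nat) (a' : Int), pvInnerA base d f a b = some (a', b') ∧ a = d ^ i * a' ∧ i ≤ e ∧
            (d ∣ base ∨ d ^ e ∣ a)) := by
  intro f
  induction f with
  | zero => intro a b hb hf; omega
  | succ f ih =>
    intro a b hb hf
    by_cases hdb : d ∣ b
    · have hmodb : PySem.Int.mod b d = 0 := (PySem.Int.mod_eq_zero_iff_dvd b d).mpr hdb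
      have hfd : PySem.Int.floordiv b d = b / d := PySem.Int.floordiv_eq_ediv_of_pos (by omega)
      have hbd : b = d * (b / d) := (Int.mul_ediv_cancel' hdb).symm
      have hb1 : 1 ≤ b / d := by nlinarith [hbd, hb, hd]
      have hlt : b / d < b := by nlinarith [hbd, hb1, hd]
      have hfle : (b / d).toNat ≤ f := by omega
      by_cases hda : d ∣ a
      · have hmoda : PySem.Int.mod a d = 0 := (PySem.Int.mod_eq_zero_iff_dvd a d).mpr hda
        have hfa : PySem.Int.floordiv a d = a / d := PySem.Int.floordiv_eq_ediv_of_pos (by omega)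
        have had : a = d * (a / d) := (Int.mul_ediv_cancel' hda).symm
        obtain ⟨e, b', hb'eq, hb'nd, hb'1, hcase⟩ := ih (a / d) (b / d) hb1 hfle
        have hbe : b = d ^ (e + 1) * b' := by rw [hbd]; rw [hb'eq]; ring
        have heq : pvInnerA base d (f + 1) a b = pvInnerA base d f (a / d) (b / d) := by
          simp only [pvInnerA]
          rw [if_pos hmodb, if_pos hmoda, hfa, hfd]
        refine ⟨e + 1, b', hbe, hb'nd, hb'1, ?_⟩
        rcases hcase with ⟨hnone, hnb, hna⟩ | ⟨i, a', hsome, haeq, hie, hsucc⟩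
        · left
          refine ⟨heq.trans hnone, hnb, ?_⟩
          intro hcon
          apply hna
          have h1 : d ^ (e + 1) ∣ d * (a / d) := by rw [← had]; exact hcon
          rw [pow_succ'] at h1
          exact (mul_dvd_mul_iff_left (by omega : d ≠ 0)).mp h1
        · right
          refine ⟨i + 1, a', heq.trans hsome, by rw [had, haeq]; ring, by omega, ?_⟩
          rcases hsucc with h | h
          · exact Or.inl h
          · right
            rw [had]
            calc d ^ (e + 1) = d * d ^ e := pow_succ' d e
              _ ∣ d * (a / d) := mul_dvd_mul_left d h
      · by_cases hdbase : d ∣ base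
        · have hmodbase : PySem.Int.mod base d = 0 := (PySem.Int.mod_eq_zero_iff_dvd base d).mpr hdbase
          obtain ⟨e, b', hb'eq, hb'nd, hb'1, hcase⟩ := ih a (b / d) hb1 hfle
          have hbe : b = d ^ (e + 1) * b' := by rw [hbd]; rw [hb'eq]; ring
          have heq : pvInnerA base d (f + 1) a b = pvInnerA base d f a (b / d) := by
            simp only [pvInnerA]
            rw [if_pos hmodb, if_neg (fun h => hda ((PySem.Int.mod_eq_zero_iff_dvd a d).mp h)),
              if_neg (not_not.mpr hmodbase), hfd]
          refine ⟨e + 1, b', hbe, hb'nd, hb'1, ?_⟩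
          rcases hcase with ⟨_, hnb, _⟩ | ⟨i, a', hsome, haeq, hie, _⟩
          · exact absurd hdbase hnb
          · exact Or.inr ⟨i, a', heq.trans hsome, haeq, by omega, Or.inl hdbase⟩
        · obtain ⟨k, m, hmnd, hdecomp⟩ := Nat.exists_eq_pow_mul_and_not_dvd
            (show b.toNat ≠ 0 by omega) d.toNat (by omega)
          have hdN : ((d.toNat : Nat) : Int) = d := Int.toNat_of_nonneg (by omega)
          have hbN : ((b.toNat : Nat) : Int) = b := Int.toNat_of_nonneg (by omega)
          have hbe : b = d ^ k * (m : Int) := by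
            have h := hdecomp
            zify at h
            rwa [hbN, hdN] at h
          have hmnd' : ¬ d ∣ (m : Int) := by
            intro h
            apply hmnd
            rw [← hdN] at h
            exact_mod_cast h
          have hm1 : 1 ≤ (m : Int) := by
            rcases Nat.eq_zero_or_pos m with h | h
            · rw [h] at hbe; simp at hbe; omega
            · exact_mod_cast h
          have hk1 : 1 ≤ k := by
            rcases Nat.eq_zero_or_pos k with h | h
            · exfalso
              apply hmnd'
              rw [h, pow_zero, one_mul] at hbe
              rwa [hbe] at hdb
            · exact h
          refine ⟨k, (m : Int), hbe, hmnd', hm1, Or.inl ⟨?_, hdbase, ?_⟩⟩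
          · simp only [pvInnerA]
            rw [if_pos hmodb, if_neg (fun h => hda ((PySem.Int.mod_eq_zero_iff_dvd a d).mp h)),
              if_pos (fun h => hdbase ((PySem.Int.mod_eq_zero_iff_dvd base d).mp h))]
          · intro hcon
            exact hda (dvd_trans (dvd_pow_self d (by omega : k ≠ 0)) hcon)
    · refine ⟨0, b, by ring, hdb, hb, Or.inr ⟨0, a, ?_, by ring, le_refl 0, Or.inr (by simp)⟩⟩
      simp only [pvInnerA]
      rw [if_neg (fun h => hdb ((PySem.Int.mod_eq_zero_iff_dvd b d).mp h))]

lemma pvPrime_of_min_divisor (d b : Int) (hd : 2 ≤ d) (hb : 1 ≤ b)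
    (hmin : ∀ e : Int, 2 ≤ e → e < d → ¬ e ∣ b) (hdb : d ∣ b) : Nat.Prime d.toNat := by
  by_contra hnp
  obtain ⟨m, hmd, hm2, hmlt⟩ := Nat.exists_dvd_of_not_prime2 (by omega) hnp
  apply hmin (m : Int) (by omega) (by omega)
  have h1 : (m : Int) ∣ ((d.toNat : Nat) : Int) := Int.natCast_dvd_natCast.mpr hmd
  rw [Int.toNat_of_nonneg (by omega)] at h1
  exact dvd_trans h1 hdb

lemma pvGood_one (a base : Int) : pvGood a 1 base := by
  intro q k hq hqk
  rcases Nat.eq_zero_or_pos k with hk | hk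
  · subst hk; left; simp
  · exfalso
    have h1 : ((q : Int)) ∣ 1 := dvd_trans (dvd_pow_self _ (by omega : k ≠ 0)) hqk
    have h2 := Int.le_of_dvd one_pos h1
    have := hq.two_le
    omega

lemma pvGood_transfer (a a' b b' base : Int) (p : Nat) (hp : p.Prime)
    (e i : Nat) (hb : b = (p : Int) ^ e * b') (ha : a = (p : Int) ^ i * a') (hb'nd : ¬ (p : Int) ∣ b')
    (hsucc : (p : Int) ∣ base ∨ (p : Int) ^ e ∣ a) :
    (pvGood a b base ↔ pvGood a' b' base) := by
  have hpZ : Prime ((p : Int)) := Nat.prime_iff_prime_int.mp hp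
  constructor
  · intro G q k hq hqk
    by_cases hqp : q = p
    · subst hqp
      rcases Nat.eq_zero_or_pos k with hk | hk
      · subst hk; left; simp
      · exact absurd (dvd_trans (dvd_pow_self _ (by omega : k ≠ 0)) hqk) hb'nd
    · have hcop : IsCoprime ((q : Int) ^ k) ((p : Int) ^ i) :=
        ((Nat.isCoprime_iff_coprime.mpr ((Nat.coprime_primes hq hp).mpr hqp)).pow)
      have hqb : ((q : Int)) ^ k ∣ b := by rw [hb]; exact hqk.mul_left _
      rcases G q k hq hqb with h | h
      · left
        have h2 : ((q : Int)) ^ k ∣ (p : Int) ^ i * a' := by rw [← ha]; exact h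
        exact hcop.dvd_of_dvd_mul_left h2
      · right; exact h
  · intro G q k hq hqk
    by_cases hqp : q = p
    · subst hqp
      have hk : k ≤ e := by
        by_contra hgt
        apply hb'nd
        have h1 : ((q : Int)) ^ (e + 1) ∣ (q : Int) ^ e * b' := by
          rw [← hb]; exact dvd_trans (pow_dvd_pow _ (by omega)) hqk
        rw [pow_succ] at h1
        exact (mul_dvd_mul_iff_left (pow_ne_zero e hpZ.ne_zero)).mp h1
      rcases hsucc with h | h
      · right; exact h
      · left; exact dvd_trans (pow_dvd_pow _ hk) h
    · have hcop : IsCoprime ((q : Int) ^ k) ((p : Int) ^ e) :=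
        ((Nat.isCoprime_iff_coprime.mpr ((Nat.coprime_primes hq hp).mpr hqp)).pow)
      have hqb' : ((q : Int)) ^ k ∣ b' := by
        apply hcop.dvd_of_dvd_mul_left
        rw [← hb]
        exact hqk
      rcases G q k hq hqb' with h | h
      · left; rw [ha]; exact h.mul_left _
      · right; exact h

lemma pvOuterA_inv (base : Int) :
    ∀ (f : Nat) (a b d : Int), 1 ≤ b → 2 ≤ d → (∀ e : Int, 2 ≤ e → e < d → ¬ e ∣ b) →
      b.toNat + 2 ≤ f + d.toNat →
      (pvOuterA base f a b d = true ↔ pvGood a b base) := by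
  intro f
  induction f with
  | zero =>
    intro a b d hb hd hmin hf
    have hb1 : b = 1 := by
      by_contra h
      exact hmin b (by omega) (by omega) dvd_rfl
    subst hb1
    simp only [pvOuterA]
    exact ⟨fun _ => pvGood_one a base, fun _ => by trivial⟩
  | succ f ih =>
    intro a b d hb hd hmin hf
    by_cases hbgt : b > 1
    · obtain ⟨e, b', hbe, hb'nd, hb'1, hcase⟩ := pvInnerA_spec d base hd b.toNat a b hb le_rfl
      rcases hcase with ⟨hnone, hnbase, hna⟩ | ⟨i, a', hsome, haeq, hie, hsucc⟩
      · have hres : pvOuterA base (f + 1) a b d = false := by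
          simp only [pvOuterA]
          rw [if_pos hbgt, hnone]
        have he1 : 1 ≤ e := by
          rcases Nat.eq_zero_or_pos e with h | h
          · exfalso; apply hna; rw [h, pow_zero]; exact one_dvd a
          · exact h
        have hdvdb : d ∣ b := by
          rw [hbe]
          exact Dvd.dvd.mul_right (dvd_pow_self d (by omega : e ≠ 0)) b'
        have hp : Nat.Prime d.toNat := pvPrime_of_min_divisor d b hd hb hmin hdvdb
        have hdN : ((d.toNat : Nat) : Int) = d := Int.toNat_of_nonneg (by omega)
        rw [hres]
        simp only [Bool.false_eq_true, false_iff]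
        intro G
        have hdvd : ((d.toNat : Int)) ^ e ∣ b := by rw [hdN]; exact ⟨b', hbe⟩
        rcases G d.toNat e hp hdvd with h | h
        · rw [hdN] at h; exact hna h
        · rw [hdN] at h; exact hnbase h
      · have hres : pvOuterA base (f + 1) a b d = pvOuterA base f a' b' (d + 1) := by
          simp only [pvOuterA]
          rw [if_pos hbgt, hsome]
        have hpow1 : (1 : Int) ≤ d ^ e := by
          have := pow_pos (by omega : (0 : Int) < d) e
          omega
        have hb'le : b' ≤ b := by nlinarith [hbe, hb'1, hpow1]
        have hmin' : ∀ e2 : Int, 2 ≤ e2 → e2 < d + 1 → ¬ e2 ∣ b' := by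
          intro e2 h2 hlt hdvd
          by_cases heq : e2 = d
          · subst heq; exact hb'nd hdvd
          · exact hmin e2 h2 (by omega) (dvd_trans hdvd ⟨d ^ e, by rw [hbe]; ring⟩)
        have hrec := ih a' b' (d + 1) hb'1 (by omega) hmin' (by omega)
        rw [hres, hrec]
        rcases Nat.eq_zero_or_pos e with he0 | he1
        · subst he0
          have hb'b : b = b' := by simpa using hbe
          have hi0 : i = 0 := by omega
          subst hi0
          have ha'a : a = a' := by simpa using haeq
          subst hb'b
          subst ha'a
          exact Iff.rfl
        · have hdvdb : d ∣ b := by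
            rw [hbe]
            exact Dvd.dvd.mul_right (dvd_pow_self d (by omega : e ≠ 0)) b'
          have hp : Nat.Prime d.toNat := pvPrime_of_min_divisor d b hd hb hmin hdvdb
          have hdN : ((d.toNat : Nat) : Int) = d := Int.toNat_of_nonneg (by omega)
          exact (pvGood_transfer a a' b b' base d.toNat hp e i (by rw [hdN]; exact hbe)
            (by rw [hdN]; exact haeq) (by rw [hdN]; exact hb'nd) (by rw [hdN]; exact hsucc)).symm
    · have hb1 : b = 1 := by omega
      subst hb1
      simp only [pvOuterA]
      rw [if_neg hbgt]
      exact ⟨fun _ => pvGood_one a base, fun _ => by trivial⟩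

lemma pvStripB_spec (g : Nat) (hg : 2 ≤ g) :
    ∀ (f b : Nat), 1 ≤ b → b ≤ f →
      ∃ e : Nat, b = g ^ e * pvStripB g f b ∧ ¬ g ∣ pvStripB g f b := by
  intro f
  induction f with
  | zero => intro b hb hf; omega
  | succ f ih =>
    intro b hb hf
    simp only [pvStripB]
    by_cases hdb : b % g = 0
    · rw [if_pos hdb]
      have hgb : g ∣ b := Nat.dvd_of_mod_eq_zero hdb
      have hq1 : 1 ≤ b / g := Nat.div_pos (Nat.le_of_dvd (by omega) hgb) (by omega)
      have hlt : b / g < b := Nat.div_lt_self (by omega) (by omega)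
      obtain ⟨e, he, hnd⟩ := ih (b / g) hq1 (by omega)
      refine ⟨e + 1, ?_, hnd⟩
      calc b = g * (b / g) := (Nat.mul_div_cancel' hgb).symm
        _ = g * (g ^ e * pvStripB g f (b / g)) := by rw [← he]
        _ = g ^ (e + 1) * pvStripB g f (b / g) := by ring
    · rw [if_neg hdb]
      exact ⟨0, by simp, fun h => hdb (Nat.dvd_iff_mod_eq_zero.mp h)⟩

lemma pvLoopB_spec (c : Nat) :
    ∀ (f b : Nat), 1 ≤ b → b ≤ f →
      (pvLoopB c f b = 1 ↔ ∀ p : Nat, p.Prime → p ∣ b → p ∣ c) := by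
  intro f
  induction f with
  | zero => intro b hb hf; omega
  | succ f ih =>
    intro b hb hf
    simp only [pvLoopB]
    by_cases hg : 1 < Nat.gcd b c
    · rw [if_pos hg]
      have hgb : Nat.gcd b c ∣ b := Nat.gcd_dvd_left b c
      have hgc : Nat.gcd b c ∣ c := Nat.gcd_dvd_right b c
      obtain ⟨e, hbe, hnd⟩ := pvStripB_spec (Nat.gcd b c) (by omega) b b hb le_rfl
      have hs1 : 1 ≤ pvStripB (Nat.gcd b c) b b := by
        rcases Nat.eq_zero_or_pos (pvStripB (Nat.gcd b c) b b) with h | h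
        · rw [h, mul_zero] at hbe; omega
        · exact h
      have he1 : 1 ≤ e := by
        rcases Nat.eq_zero_or_pos e with h | h
        · rw [h, pow_zero, one_mul] at hbe
          exact absurd (hbe ▸ hgb) hnd
        · exact h
      have hge2 : 2 ≤ Nat.gcd b c ^ e :=
        le_trans (by omega) (Nat.le_self_pow (by omega) (Nat.gcd b c))
      have hslt : pvStripB (Nat.gcd b c) b b < b := by
        have h2 : 2 * pvStripB (Nat.gcd b c) b b ≤ b :=
          le_of_le_of_eq (Nat.mul_le_mul_right _ hge2) hbe.symm
        omega
      rw [ih _ hs1 (by omega)]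
      constructor
      · intro H p hp hpb
        have hpb' : p ∣ Nat.gcd b c ^ e * pvStripB (Nat.gcd b c) b b := by
          rw [← hbe]; exact hpb
        rcases (Nat.Prime.dvd_mul hp).mp hpb' with h | h
        · exact dvd_trans (hp.dvd_of_dvd_pow h) hgc
        · exact H p hp h
      · intro H p hp hps
        exact H p hp (dvd_trans hps (Dvd.intro_left _ hbe.symm))
    · rw [if_neg hg]
      constructor
      · intro h1 p hp hpb
        rw [h1] at hpb
        exact absurd (Nat.dvd_one.mp hpb) hp.ne_one
      · intro H
        by_contra hb1
        obtain ⟨p, hp, hpb⟩ := Nat.exists_prime_and_dvd hb1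
        have hpg : p ∣ Nat.gcd b c := Nat.dvd_gcd hpb (H p hp hpb)
        have hgpos : 0 < Nat.gcd b c := Nat.gcd_pos_of_pos_left c (by omega)
        have := Nat.le_of_dvd hgpos hpg
        have := hp.two_le
        omega

lemma pvGood_iff_reduced (a b base : Int) (hb : 2 ≤ b) :
    (pvGood a b base ↔
      ∀ p : Nat, p.Prime → p ∣ b.toNat / Nat.gcd a.natAbs b.toNat → p ∣ base.natAbs) := by
  have hbN : b = (b.toNat : Int) := (Int.toNat_of_nonneg (by omega)).symm
  have step1 : pvGood a b base ↔
      ∀ p k : Nat, p.Prime → p ^ k ∣ b.toNat → (p ^ k ∣ a.natAbs ∨ p ∣ base.natAbs) := by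
    unfold pvGood
    constructor
    · intro H p k hp hpk
      have h1 : ((p : Int)) ^ k ∣ b := by
        rw [hbN]; exact_mod_cast Int.natCast_dvd_natCast.mpr hpk
      rcases H p k hp h1 with h | h
      · left
        have h2 : ((p ^ k : Nat) : Int) ∣ a := by exact_mod_cast h
        exact Int.ofNat_dvd_left.mp h2
      · right; exact Int.ofNat_dvd_left.mp h
    · intro H p k hp hpk
      have h1 : p ^ k ∣ b.toNat := by
        have h2 : ((p ^ k : Nat) : Int) ∣ (b.toNat : Int) := by rw [← hbN]; exact_mod_cast hpk
        exact_mod_cast h2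
      rcases H p k hp h1 with h | h
      · left
        have h2 := Int.ofNat_dvd_left.mpr h
        exact_mod_cast h2
      · right
        have h2 := Int.ofNat_dvd_left.mpr h
        exact_mod_cast h2
  rw [step1]
  have hN2 : 2 ≤ b.toNat := by omega
  by_cases hA0 : a.natAbs = 0
  · rw [hA0]
    simp only [Nat.gcd_zero_left, Nat.div_self (by omega : 0 < b.toNat)]
    constructor
    · intro _ p hp hp1
      exact absurd (Nat.dvd_one.mp hp1) hp.ne_one
    · intro _ p k hp _
      exact Or.inl (dvd_zero _)
  · have hg : Nat.gcd a.natAbs b.toNat ∣ b.toNat := Nat.gcd_dvd_right a.natAbs b.toNat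
    have hgpos : 0 < Nat.gcd a.natAbs b.toNat := Nat.gcd_pos_of_pos_right a.natAbs (by omega)
    have hb0pos : 0 < b.toNat / Nat.gcd a.natAbs b.toNat :=
      Nat.div_pos (Nat.le_of_dvd (by omega) hg) hgpos
    have hfact : (b.toNat / Nat.gcd a.natAbs b.toNat).factorization =
        b.toNat.factorization - (a.natAbs.factorization ⊓ b.toNat.factorization) := by
      rw [Nat.factorization_div hg, Nat.factorization_gcd hA0 (by omega : b.toNat ≠ 0)]
    constructor
    · intro H p hp hpb0
      by_contra hpc
      have h1 : 0 < (b.toNat / Nat.gcd a.natAbs b.toNat).factorization p :=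
        Nat.Prime.factorization_pos_of_dvd hp (by omega) hpb0
      rw [hfact, Finsupp.tsub_apply, Finsupp.inf_apply] at h1
      have h2 : a.natAbs.factorization p + 1 ≤ b.toNat.factorization p := by omega
      have h3 : p ^ (a.natAbs.factorization p + 1) ∣ b.toNat :=
        (Nat.Prime.pow_dvd_iff_le_factorization hp (by omega : b.toNat ≠ 0)).mpr h2
      rcases H p (a.natAbs.factorization p + 1) hp h3 with h | h
      · have h4 := (Nat.Prime.pow_dvd_iff_le_factorization hp hA0).mp h
        omega
      · exact hpc h
    · intro H p k hp hpk
      by_cases hpc : p ∣ base.natAbs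
      · exact Or.inr hpc
      · left
        have hnb0 : ¬ p ∣ b.toNat / Nat.gcd a.natAbs b.toNat := fun h => hpc (H p hp h)
        have h0 : (b.toNat / Nat.gcd a.natAbs b.toNat).factorization p = 0 :=
          Nat.factorization_eq_zero_of_not_dvd hnb0
        rw [hfact, Finsupp.tsub_apply, Finsupp.inf_apply] at h0
        have hk : k ≤ b.toNat.factorization p :=
          (Nat.Prime.pow_dvd_iff_le_factorization hp (by omega : b.toNat ≠ 0)).mp hpk
        exact (Nat.Prime.pow_dvd_iff_le_factorization hp hA0).mpr (by omega)

lemma pvA_iff (a b base : Int) (hb : 2 ≤ b) :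
    (fraction_is_finite a b base = true ↔ pvGood a b base) := by
  unfold fraction_is_finite
  exact pvOuterA_inv base (b.toNat + 1) a b 2 (by omega) (by omega)
    (fun e h2 hlt _ => by omega) (by omega)

lemma pvB_iff (a b base : Int) (hb : 2 ≤ b) :
    (fraction_is_finite_alt a b base = true ↔ pvGood a b base) := by
  unfold fraction_is_finite_alt
  rw [if_neg (by omega : ¬ b ≤ 1), beq_iff_eq]
  have hgpos : 0 < Nat.gcd a.natAbs b.toNat := Nat.gcd_pos_of_pos_right a.natAbs (by omega)
  have hb0 : 1 ≤ b.toNat / Nat.gcd a.natAbs b.toNat :=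
    Nat.div_pos (Nat.le_of_dvd (by omega) (Nat.gcd_dvd_right _ _)) hgpos
  rw [pvLoopB_spec base.natAbs _ _ hb0 le_rfl]
  exact (pvGood_iff_reduced a b base hb).symm

lemma pvMain (a b base : Int) : fraction_is_finite a b base = fraction_is_finite_alt a b base := by
  by_cases hb : b ≤ 1
  · have hA : fraction_is_finite a b base = true := by
      unfold fraction_is_finite
      simp only [pvOuterA]
      rw [if_neg (by omega)]
    have hB : fraction_is_finite_alt a b base = true := by
      unfold fraction_is_finite_alt
      rw [if_pos hb]
    rw [hA, hB]
  · rw [Bool.eq_iff_iff, pvA_iff a b base (by omega), pvB_iff a b base (by omega)]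

-- ===== VERDICT (by name: the statement is the Claim_ definition above) =====
theorem fraction_is_finite_spec : Claim_equal_fraction_is_finite := by
  intro a b base _
  unfold Spec_fraction_is_finite
  exact pvMain a b base
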